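-- pv_equiv track=rewrite | github.com/nogueirayure001/CS50-Python | plates/plates.py | has_number_in_middle
-- ===== SOURCE A (Python) =====
-- def has_number_in_middle(string):
--     has_number = False
--
--     for letter in string:
--         if letter.isdigit():
--             has_number = True
--
--         if has_number and letter.isalpha():
--             return True
--
--     return False
-- ===== SOURCE B (Python) =====
-- def has_number_in_middle(string):
--     # index-based formulation: a digit occurs strictly before the last letter
--     digit_positions = [i for i, c in enumerate(string) if c.isdigit()]
--     alpha_positions = [i for i, c in enumerate(string) if c.isalpha()]
--     if not digit_positions or not alpha_positions:
--         return False
--     return digit_positions[0] < alpha_positions[-1]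
-- ===== Notes on version B (the rewrite author's own statement) =====
-- stated objective: alternative
-- what changed: Replaced A's flag-carrying early-return scan with an index-based formulation: collect the positions of digits and of letters and return whether the first digit position is strictly before the last letter position.
import Mathlib
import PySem

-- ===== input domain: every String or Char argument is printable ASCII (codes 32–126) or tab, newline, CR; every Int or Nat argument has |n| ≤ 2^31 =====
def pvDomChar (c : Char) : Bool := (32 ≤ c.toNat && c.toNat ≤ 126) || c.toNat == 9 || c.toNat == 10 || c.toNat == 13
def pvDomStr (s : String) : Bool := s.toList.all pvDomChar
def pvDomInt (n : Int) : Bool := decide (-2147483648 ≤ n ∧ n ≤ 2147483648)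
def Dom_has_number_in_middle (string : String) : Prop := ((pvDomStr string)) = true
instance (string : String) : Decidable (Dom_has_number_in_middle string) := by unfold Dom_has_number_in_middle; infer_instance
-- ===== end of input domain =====

-- B replaces A's flag-carrying early-return scan by an index-based formulation: first digit position strictly before last letter position (alternative algorithm, same value).

-- ===== PORT A =====
-- A: one pass carrying a has_number flag, early return on a letter seen after a digit.
def hnimGoA : List Char → Bool → Bool
  | [], _ => false
  | c :: cs, has_number =>
    let has_number := if PySem.Chars.isdigit c then true else has_number
    if has_number && PySem.Chars.isalpha c then true else hnimGoA cs has_number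

def has_number_in_middle (string : String) : Bool :=
  hnimGoA string.toList false

-- ===== PORT B =====
-- B: the two position comprehensions are filter+map over enumerate; then compare
-- digit_positions[0] with alpha_positions[-1] after the emptiness guards.
def has_number_in_middle_alt (string : String) : Bool :=
  let digit_positions :=
    ((PySem.List.enumerate string.toList 0).filter (fun p => PySem.Chars.isdigit p.2)).map Prod.fst
  let alpha_positions :=
    ((PySem.List.enumerate string.toList 0).filter (fun p => PySem.Chars.isalpha p.2)).map Prod.fst
  if digit_positions.isEmpty || alpha_positions.isEmpty then false
  else decide (digit_positions.headD 0 < alpha_positions.getLastD 0)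

-- ===== PRECONDITION & SPEC =====
def Spec_has_number_in_middle (string : String) (out : Bool) : Prop := out = has_number_in_middle_alt string
instance (string : String) (out : Bool) : Decidable (Spec_has_number_in_middle string out) := by unfold Spec_has_number_in_middle; infer_instance

-- ===== CLAIM (what is proved, stated in full; the proofs are below) =====
def Claim_equal_has_number_in_middle : Prop := ∀ (string : String), Dom_has_number_in_middle string → Spec_has_number_in_middle string (has_number_in_middle string)

-- ===== LEMMAS AND PROOFS =====

-- positions of the characters of l (enumerated from n) satisfying predicate q
def hnimPos (q : Char → Bool) (l : List Char) (n : Int) : List Int :=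
  ((PySem.List.enumerate l n).filter (fun p => q p.2)).map Prod.fst

-- B generalized to an arbitrary start index
def hnimF (l : List Char) (n : Int) : Bool :=
  if (hnimPos PySem.Chars.isdigit l n).isEmpty || (hnimPos PySem.Chars.isalpha l n).isEmpty then false
  else decide ((hnimPos PySem.Chars.isdigit l n).headD 0 < (hnimPos PySem.Chars.isalpha l n).getLastD 0)

theorem hnim_digit_not_alpha (c : Char) (h : PySem.Chars.isdigit c = true) :
    PySem.Chars.isalpha c = false := by
  unfold PySem.Chars.isdigit at h
  unfold PySem.Chars.isalpha PySem.Chars.isupper PySem.Chars.islower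
  simp only [Bool.and_eq_true, decide_eq_true_eq, Char.le_def, UInt32.le_iff_toNat_le] at h
  simp only [Bool.or_eq_false_iff, Bool.and_eq_false_iff, decide_eq_false_iff_not, Char.le_def,
    UInt32.le_iff_toNat_le]
  have h0 : ('0' : Char).val.toNat = 48 := rfl
  have h9 : ('9' : Char).val.toNat = 57 := rfl
  have hA : ('A' : Char).val.toNat = 65 := rfl
  have hZ : ('Z' : Char).val.toNat = 90 := rfl
  have ha : ('a' : Char).val.toNat = 97 := rfl
  have hz : ('z' : Char).val.toNat = 122 := rfl
  omega

theorem hnimGoA_true (l : List Char) : hnimGoA l true = l.any PySem.Chars.isalpha := by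
  induction l with
  | nil => rfl
  | cons c cs ih =>
    simp only [hnimGoA, List.any_cons]
    by_cases ha : PySem.Chars.isalpha c = true
    · simp [ha]
    · simp only [Bool.not_eq_true] at ha
      simp [ha, ih]

theorem hnimPos_cons (q : Char → Bool) (c : Char) (cs : List Char) (n : Int) :
    hnimPos q (c :: cs) n =
      (if q c then [n] else []) ++ hnimPos q cs (n + 1) := by
  simp only [hnimPos, PySem.List.enumerate_cons, List.filter_cons]
  by_cases h : q c = true <;> simp [h]

theorem hnimPos_ge (q : Char → Bool) (l : List Char) (n : Int) :
    ∀ i ∈ hnimPos q l n, n ≤ i := by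
  intro i hi
  simp only [hnimPos, List.mem_map, List.mem_filter] at hi
  obtain ⟨p, ⟨hmem, -⟩, rfl⟩ := hi
  rw [PySem.List.mem_enumerate_iff] at hmem
  obtain ⟨k, hk, rfl⟩ := hmem
  simp

theorem hnimPos_empty_iff (q : Char → Bool) (l : List Char) (n : Int) :
    (hnimPos q l n).isEmpty = !(l.any q) := by
  induction l generalizing n with
  | nil => rfl
  | cons c cs ih =>
    rw [hnimPos_cons]
    by_cases h : q c = true
    · simp [h]
    · simp only [Bool.not_eq_true] at h
      simp [h, ih]

-- main invariant: A's pass from a clear flag equals the index comparison from any start n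
theorem hnimGoA_eq_F (l : List Char) : ∀ n : Int, hnimGoA l false = hnimF l n := by
  induction l with
  | nil => intro n; rfl
  | cons c cs ih =>
    intro n
    by_cases hd : PySem.Chars.isdigit c = true
    · -- first digit found at n: A returns cs.any isalpha
      have ha := hnim_digit_not_alpha c hd
      have hA : hnimGoA (c :: cs) false = cs.any PySem.Chars.isalpha := by
        simp [hnimGoA, hd, ha, hnimGoA_true]
      rw [hA]
      have hemp := hnimPos_empty_iff PySem.Chars.isalpha cs (n + 1)
      simp only [hnimF, hnimPos_cons, hd, ha, Bool.false_eq_true, if_true, if_false,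
        List.nil_append, List.singleton_append, List.isEmpty_cons, Bool.false_or,
        List.headD_cons, hemp]
      by_cases hal : cs.any PySem.Chars.isalpha = true
      · have hne : hnimPos PySem.Chars.isalpha cs (n + 1) ≠ [] := by
          intro h0
          rw [h0, hal] at hemp
          simp at hemp
        obtain ⟨a, as, has⟩ := List.exists_cons_of_ne_nil hne
        have hm : (a :: as).getLastD 0 ∈ a :: as := by
          rw [List.getLastD_cons]
          exact List.getLastD_mem_cons
        have hge : n + 1 ≤ (a :: as).getLastD 0 := by
          apply hnimPos_ge PySem.Chars.isalpha cs (n + 1)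
          rw [has]; exact hm
        rw [has, hal]
        simp only [Bool.not_true, Bool.false_eq_true, if_false]
        symm
        rw [decide_eq_true_eq]
        omega
      · simp only [Bool.not_eq_true] at hal
        simp [hal]
    · simp only [Bool.not_eq_true] at hd
      have hA : hnimGoA (c :: cs) false = hnimGoA cs false := by
        simp [hnimGoA, hd]
      rw [hA, ih (n + 1)]
      by_cases ha : PySem.Chars.isalpha c = true
      · -- a letter before any digit can only be alpha_positions[-1] when no later letter exists,
        -- and then the first digit (≥ n+1) is not before it
        simp only [hnimF, hnimPos_cons, hd, ha, Bool.false_eq_true, if_true, if_false,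
          List.nil_append, List.singleton_append, List.isEmpty_cons, Bool.or_false]
        by_cases hde : (hnimPos PySem.Chars.isdigit cs (n + 1)).isEmpty = true
        · simp [hde]
        · simp only [hde, Bool.false_eq_true, if_false]
          have hde' : hnimPos PySem.Chars.isdigit cs (n + 1) ≠ [] := by
            intro h0; rw [h0] at hde; exact hde rfl
          obtain ⟨d, ds, hds⟩ := List.exists_cons_of_ne_nil hde'
          have hdge : n + 1 ≤ d := by
            apply hnimPos_ge PySem.Chars.isdigit cs (n + 1)
            rw [hds]; exact List.mem_cons_self
          by_cases hae : hnimPos PySem.Chars.isalpha cs (n + 1) = []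
          · rw [hds, hae]
            simp only [List.isEmpty_nil, Bool.or_true, if_true, List.getLastD_cons,
              List.getLastD_nil, List.headD_cons]
            symm
            rw [decide_eq_false_iff_not]
            omega
          · obtain ⟨a, as, has⟩ := List.exists_cons_of_ne_nil hae
            rw [hds, has]
            simp
      · simp only [Bool.not_eq_true] at ha
        simp [hnimF, hnimPos_cons, hd, ha]

-- ===== VERDICT (by name: the statement is the Claim_ definition above) =====
theorem has_number_in_middle_spec : Claim_equal_has_number_in_middle := by
  intro s _
  unfold Spec_has_number_in_middle has_number_in_middle has_number_in_middle_alt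
  simpa [hnimF, hnimPos] using hnimGoA_eq_F s.toList 0
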